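-- pv_equiv track=rewrite | github.com/alecsandraiordache/BioInformatics | Project_L12/ex2/ex2.py | calculate_signal
-- ===== SOURCE A (Python) =====
-- def calculate_signal(genome, motif):
--     motif_length = len(motif)
--     signal = []
--
--     for i in range(len(genome) - motif_length + 1):
--         window_sequence = genome[i : i + motif_length]
--
--         score = 0
--         for j in range(motif_length):
--             if window_sequence[j] == motif[j]:
--                 score += 1
--
--         signal.append(score)
--
--     return signal
-- ===== SOURCE B (Python) =====
-- def calculate_signal(genome, motif):
--     # Transposed accumulation: instead of scoring each window with an inner scan,
--     # start from a zero score vector and, for each motif position j, add its per-window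
--     # match indicator across all windows at once.
--     k = len(genome) - len(motif) + 1
--     scores = [0] * max(k, 0)
--     for j, c in enumerate(motif):
--         scores = [s + (1 if genome[i + j] == c else 0)
--                   for i, s in enumerate(scores)]
--     return scores
-- ===== Notes on version B (the rewrite author's own statement) =====
-- stated objective: alternative
-- what changed: Replaces the per-window inner scoring scan (extracting each window slice and comparing it character by character) with a transposed accumulation: a zero signal vector is updated once per motif position, adding that position's match indicator to every window's running score.
import Mathlib
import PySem

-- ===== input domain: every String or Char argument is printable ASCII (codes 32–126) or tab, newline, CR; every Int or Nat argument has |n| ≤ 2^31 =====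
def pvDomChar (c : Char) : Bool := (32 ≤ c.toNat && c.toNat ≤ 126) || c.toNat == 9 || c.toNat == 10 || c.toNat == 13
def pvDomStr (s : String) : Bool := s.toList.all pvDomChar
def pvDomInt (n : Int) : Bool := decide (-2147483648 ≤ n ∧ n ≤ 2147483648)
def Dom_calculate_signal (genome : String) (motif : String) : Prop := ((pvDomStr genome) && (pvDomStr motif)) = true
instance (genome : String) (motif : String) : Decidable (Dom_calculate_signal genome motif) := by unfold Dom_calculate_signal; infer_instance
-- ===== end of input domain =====

-- B replaces A's per-window inner scoring scan with a transposed accumulation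
-- over motif positions (objective: alternative, same asymptotic cost).

-- ===== PORT A =====
def calculate_signal (genome : String) (motif : String) : List Int :=
  let g := genome.toList
  let mo := motif.toList
  let motif_length : Int := mo.length
  (PySem.List.pyRange 0 ((g.length : Int) - motif_length + 1) 1).foldl
    (fun signal i =>
      let window_sequence := PySem.List.slice g (some i) (some (i + motif_length))
      let score := (PySem.List.pyRange 0 motif_length 1).foldl
        (fun score j =>
          if PySem.List.pyGet? window_sequence j = PySem.List.pyGet? mo j then score + 1
          else score)
        (0 : Int)
      signal ++ [score])
    []

-- ===== PORT B =====
def calculate_signal_alt (genome : String) (motif : String) : List Int :=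
  let g := genome.toList
  let k : Int := (g.length : Int) - (motif.toList.length : Int) + 1
  let signal : List Int := List.replicate (max k 0).toNat 0
  (PySem.List.enumerate motif.toList).foldl
    (fun signal jc =>
      (PySem.List.enumerate signal).map
        (fun is => is.2 + (if PySem.List.pyGet? g (is.1 + jc.1) = some jc.2 then (1 : Int) else 0)))
    signal

-- ===== PRECONDITION & SPEC =====
def Spec_calculate_signal (genome : String) (motif : String) (out : List Int) : Prop := out = calculate_signal_alt genome motif
instance (genome : String) (motif : String) (out : List Int) : Decidable (Spec_calculate_signal genome motif out) := by unfold Spec_calculate_signal; infer_instance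

-- ===== CLAIM (what is proved, stated in full; the proofs are below) =====
def Claim_equal_calculate_signal : Prop := ∀ (genome : String) (motif : String), Dom_calculate_signal genome motif → Spec_calculate_signal genome motif (calculate_signal genome motif)

-- ===== LEMMAS AND PROOFS =====

/-- Score contributed to the window at position `i` by the motif suffix `mo'`
that starts at motif offset `j0`. -/
def tailSc (g : List Char) (i : Nat) (j0 : Nat) : List Char → Int
  | [] => 0
  | c :: tl => (if g[i + j0]? = some c then (1 : Int) else 0) + tailSc g i (j0 + 1) tl

theorem getElem?_enumerate {α : Type} (l : List α) (s : Int) (i : Nat) :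
    (PySem.List.enumerate l s)[i]? = l[i]?.map (fun x => (s + i, x)) := by
  induction l generalizing s i with
  | nil => simp [PySem.List.enumerate]
  | cons x xs ih =>
    rw [PySem.List.enumerate_cons]
    cases i with
    | zero => simp
    | succ n =>
      simp only [List.getElem?_cons_succ, ih]
      cases xs[n]? with
      | none => rfl
      | some y =>
        simp only [Option.map_some, Option.some.injEq, Prod.mk.injEq]
        refine ⟨by push_cast; ring, trivial⟩

/-- One B-step, observed at index `i`. -/
theorem step_getElem? (g : List Char) (sig : List Int) (j : Int) (c : Char) (i : Nat) :
    ((PySem.List.enumerate sig).map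
        (fun is => is.2 + (if PySem.List.pyGet? g (is.1 + j) = some c then (1 : Int) else 0)))[i]?
      = sig[i]?.map (fun s => s + (if PySem.List.pyGet? g ((i : Int) + j) = some c then (1 : Int) else 0)) := by
  rw [List.getElem?_map, getElem?_enumerate]
  cases sig[i]? <;> simp

/-- B's fold, observed at index `i`: it adds the suffix score `tailSc`. -/
theorem b_fold_getElem? (g : List Char) (mo' : List Char) (j0 : Nat) (sig : List Int) (i : Nat) :
    ((PySem.List.enumerate mo' (j0 : Int)).foldl
      (fun signal jc =>
        (PySem.List.enumerate signal).map
          (fun is => is.2 + (if PySem.List.pyGet? g (is.1 + jc.1) = some jc.2 then (1 : Int) else 0)))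
      sig)[i]?
      = sig[i]?.map (fun s => s + tailSc g i j0 mo') := by
  induction mo' generalizing j0 sig with
  | nil => cases h : sig[i]? <;> simp [PySem.List.enumerate, tailSc, h]
  | cons c tl ih =>
    rw [PySem.List.enumerate_cons]
    simp only [List.foldl_cons]
    have h1 : ((j0 : Int) + 1) = ((j0 + 1 : Nat) : Int) := by push_cast; ring
    rw [h1, ih]
    rw [step_getElem?]
    cases sig[i]? with
    | none => rfl
    | some s =>
      simp only [Option.map_some, Option.some.injEq]
      have hg : PySem.List.pyGet? g ((i : Int) + (j0 : Int)) = g[i + j0]? := by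
        have h2 : ((i : Int) + (j0 : Int)) = ((i + j0 : Nat) : Int) := by push_cast; ring
        rw [h2, PySem.List.pyGet?_natCast]
      rw [hg]
      simp [tailSc, add_assoc]

/-- A counting fold over `range mo'.length` equals `tailSc`. -/
theorem fold_range_tailSc (g : List Char) (i : Nat) (mo' : List Char) (j0 : Nat) (acc : Int) :
    (List.range mo'.length).foldl
      (fun score k => if g[i + (j0 + k)]? = mo'[k]? then score + 1 else score) acc
      = acc + tailSc g i j0 mo' := by
  induction mo' generalizing j0 acc with
  | nil => simp [tailSc]
  | cons c tl ih =>
    rw [List.length_cons, List.range_succ_eq_map]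
    simp only [List.foldl_cons, List.foldl_map, Nat.add_zero, List.getElem?_cons_zero,
      List.getElem?_cons_succ, Nat.succ_eq_add_one]
    calc (List.range tl.length).foldl
          (fun score k => if g[i + (j0 + (k + 1))]? = tl[k]? then score + 1 else score)
          (if g[i + j0]? = some c then acc + 1 else acc)
        = (List.range tl.length).foldl
          (fun score k => if g[i + ((j0 + 1) + k)]? = tl[k]? then score + 1 else score)
          (if g[i + j0]? = some c then acc + 1 else acc) := by
          apply PySem.List.foldl_congr_mem
          intro a k _
          have h : j0 + (k + 1) = (j0 + 1) + k := by omega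
          rw [h]
      _ = acc + tailSc g i j0 (c :: tl) := by
          rw [ih]
          simp only [tailSc]
          split_ifs <;> ring

/-- A's inner score at window offset `i` equals `tailSc` from offset 0. -/
theorem a_score_eq (g mo : List Char) (i : Nat) :
    ((PySem.List.pyRange 0 (mo.length : Int) 1).foldl
      (fun score j =>
        if PySem.List.pyGet? (PySem.List.slice g (some (i : Int)) (some ((i : Int) + (mo.length : Int)))) j
            = PySem.List.pyGet? mo j then score + 1
        else score)
      (0 : Int)) = tailSc g i 0 mo := by
  rw [PySem.List.slice_natCast_add, PySem.List.pyRange_one, List.foldl_map]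
  have hK : ((mo.length : Int) - 0).toNat = mo.length := by omega
  rw [hK]
  calc (List.range mo.length).foldl
        (fun (score : Int) (k : Nat) =>
          if PySem.List.pyGet? (List.take mo.length (List.drop i g)) ((0 : Int) + (k : Int))
              = PySem.List.pyGet? mo ((0 : Int) + (k : Int)) then score + 1 else score) (0 : Int)
      = (List.range mo.length).foldl
        (fun (score : Int) (k : Nat) =>
          if g[i + (0 + k)]? = mo[k]? then score + 1 else score) (0 : Int) := by
        apply PySem.List.foldl_congr_mem
        intro a k hk
        rw [List.mem_range] at hk
        rw [zero_add, Nat.zero_add, PySem.List.pyGet?_natCast, PySem.List.pyGet?_natCast,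
          List.getElem?_take_of_lt hk, List.getElem?_drop]
    _ = tailSc g i 0 mo := by rw [fold_range_tailSc]; ring

-- ===== VERDICT (by name: the statement is the Claim_ definition above) =====
theorem calculate_signal_spec : Claim_equal_calculate_signal := by
  intro genome motif _
  unfold Spec_calculate_signal calculate_signal calculate_signal_alt
  simp only []
  set g := genome.toList with hg
  set mo := motif.toList with hmo
  -- A-side: a map of window scores
  rw [PySem.List.foldl_append_singleton_eq_map, List.nil_append,
    PySem.List.pyRange_one 0 ((g.length : Int) - (mo.length : Int) + 1), List.map_map]
  -- B-side vs A-side, pointwise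
  apply List.ext_getElem?
  intro i
  have hb := b_fold_getElem? g mo 0 (List.replicate (max ((g.length : Int) - (mo.length : Int) + 1) 0).toNat 0) i
  rw [Nat.cast_zero] at hb
  rw [hb, List.getElem?_map, List.getElem?_replicate]
  by_cases hi : i < ((g.length : Int) - (mo.length : Int) + 1).toNat
  · have hi' : i < (((g.length : Int) - (mo.length : Int) + 1) - 0).toNat := by omega
    have hi'' : i < (max ((g.length : Int) - (mo.length : Int) + 1) 0).toNat := by omega
    rw [List.getElem?_range hi', if_pos hi'']
    simp only [Option.map_some, Function.comp_apply, zero_add]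
    rw [a_score_eq g mo i]
  · have hi' : ¬ i < (((g.length : Int) - (mo.length : Int) + 1) - 0).toNat := by omega
    have hi'' : ¬ i < (max ((g.length : Int) - (mo.length : Int) + 1) 0).toNat := by omega
    rw [if_neg hi'']
    rw [List.getElem?_eq_none (by simpa using hi')]
    rfl
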